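-- pv_equiv track=rewrite | github.com/EliasAroni2000/automatas | Aroni-tp1-v2.py | tokenNot
-- ===== SOURCE A (Python) =====
-- estado_final = "estado final"
--
-- estadoNoFinal = "estado no aceptado"
--
-- estadoTrampa = "estado trampa"
--
-- def tokenNot(lexema):
--     estado = 0
--     estadoFinal = [3]
--     caracter = {0:{'n':1},1:{'o':2},2:{'t':3},3:{}}
--     for c in lexema:
--         if c in caracter[estado]:
--             estado = caracter[estado][c]
--         else:
--             estado = -1
--             break
--     if estado == -1:
--         return estadoTrampa
--     if estado in estadoFinal:
--         return estado_final
--     else: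
--         return estadoNoFinal
-- ===== SOURCE B (Python) =====
-- estado_final = "estado final"
--
-- estadoNoFinal = "estado no aceptado"
--
-- estadoTrampa = "estado trampa"
--
-- def tokenNot(lexema):
--     if lexema == "not":
--         return estado_final
--     if "not".startswith(lexema):
--         return estadoNoFinal
--     return estadoTrampa
-- ===== Notes on version B (the rewrite author's own statement) =====
-- stated objective: simpler
-- what changed: Replaced the transition-table dict and the character-by-character DFA loop with direct closed-form string tests: equality with 'not' and a prefix check.
import Mathlib
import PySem

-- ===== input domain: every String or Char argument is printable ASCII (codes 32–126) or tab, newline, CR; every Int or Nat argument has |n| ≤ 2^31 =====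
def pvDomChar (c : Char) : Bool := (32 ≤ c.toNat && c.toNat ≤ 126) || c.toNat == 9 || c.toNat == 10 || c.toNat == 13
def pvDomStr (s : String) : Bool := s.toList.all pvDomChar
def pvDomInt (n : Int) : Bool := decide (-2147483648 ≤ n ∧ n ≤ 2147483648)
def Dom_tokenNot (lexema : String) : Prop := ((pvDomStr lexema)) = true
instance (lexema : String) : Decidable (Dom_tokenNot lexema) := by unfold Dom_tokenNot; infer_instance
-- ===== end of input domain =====

-- B replaces A's transition-table DFA loop with direct equality/prefix tests on "not" (simpler).

-- ===== PORT A =====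
def pvA_estado_final : String := "estado final"
def pvA_estadoNoFinal : String := "estado no aceptado"
def pvA_estadoTrampa : String := "estado trampa"

-- caracter = {0:{'n':1},1:{'o':2},2:{'t':3},3:{}}
def pvA_caracter : PySem.Dict Int (PySem.Dict Char Int) :=
  ⟨[(0, ⟨[('n', 1)]⟩), (1, ⟨[('o', 2)]⟩), (2, ⟨[('t', 3)]⟩), (3, ⟨[]⟩)]⟩

-- the 'for c in lexema' loop with the break; 'caracter[estado]' is a plain dict
-- lookup — estado is always a key (0..3) when it is looked up, so the `.getD []`
-- default branch is never taken (it stands for Python's KeyError, which cannot occur).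
def pvA_loop : Int → List Char → Int
  | estado, [] => estado
  | estado, c :: cs =>
    let row := (PySem.Dict.get? pvA_caracter estado).getD PySem.Dict.empty
    match PySem.Dict.get? row c with
    | some e => pvA_loop e cs
    | none => -1   -- estado = -1; break

def tokenNot (lexema : String) : String :=
  let estado := pvA_loop 0 lexema.toList
  if estado = -1 then pvA_estadoTrampa
  else if estado ∈ [(3 : Int)] then pvA_estado_final
  else pvA_estadoNoFinal

-- ===== PORT B =====
def pvB_estado_final : String := "estado final"
def pvB_estadoNoFinal : String := "estado no aceptado"
def pvB_estadoTrampa : String := "estado trampa"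

def tokenNot_alt (lexema : String) : String :=
  if lexema = "not" then pvB_estado_final
  else if PySem.Str.startswith "not" lexema then pvB_estadoNoFinal
  else pvB_estadoTrampa

-- ===== PRECONDITION & SPEC =====
def Spec_tokenNot (lexema : String) (out : String) : Prop := out = tokenNot_alt lexema
instance (lexema : String) (out : String) : Decidable (Spec_tokenNot lexema out) := by unfold Spec_tokenNot; infer_instance

-- ===== CLAIM (what is proved, stated in full; the proofs are below) =====
def Claim_equal_tokenNot : Prop := ∀ (lexema : String), Dom_tokenNot lexema → Spec_tokenNot lexema (tokenNot lexema)

-- ===== LEMMAS AND PROOFS =====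

theorem str_eq_iff_toList (s t : String) : s = t ↔ s.toList = t.toList :=
  ⟨fun h => h ▸ rfl, fun h => String.toList_injective h⟩

theorem tokenNot_eq_alt (lexema : String) : tokenNot lexema = tokenNot_alt lexema := by
  have heq : (lexema = "not") ↔ lexema.toList = ['n', 'o', 't'] := by
    simpa using str_eq_iff_toList lexema "not"
  have hpre : PySem.Str.startswith "not" lexema = true ↔ lexema.toList <+: ['n', 'o', 't'] := by
    simpa [PySem.Str.startswith] using PySem.Chars.startswith_iff ("not".toList) lexema.toList
  unfold tokenNot tokenNot_alt
  rcases h : lexema.toList with _ | ⟨c1, _ | ⟨c2, _ | ⟨c3, _ | ⟨c4, cs⟩⟩⟩⟩ <;>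
    simp only [heq, hpre, h] <;>
    [skip;
     by_cases h1 : 'n' = c1;
     by_cases h1 : 'n' = c1 <;> by_cases h2 : 'o' = c2;
     by_cases h1 : 'n' = c1 <;> by_cases h2 : 'o' = c2 <;> by_cases h3 : 't' = c3;
     by_cases h1 : 'n' = c1 <;> by_cases h2 : 'o' = c2 <;> by_cases h3 : 't' = c3] <;>
    (try subst h1) <;> (try subst h2) <;> (try subst h3) <;>
    simp_all [pvA_loop, pvA_caracter, PySem.Dict.get?, List.find?,
      PySem.Chars.startswith,
      pvA_estado_final, pvA_estadoNoFinal, pvA_estadoTrampa,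
      pvB_estado_final, pvB_estadoNoFinal, pvB_estadoTrampa] <;>
    simp_all [eq_comm]

-- ===== VERDICT (by name: the statement is the Claim_ definition above) =====
theorem tokenNot_spec : Claim_equal_tokenNot := by
  intro lexema _
  unfold Spec_tokenNot
  exact tokenNot_eq_alt lexema
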